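-- pv_equiv track=rewrite | github.com/talkon/magic-squares | enumeration.py | gen_rows
-- ===== SOURCE A (Python) =====
-- tup_bank = {}
--
-- primes = (2, 3, 5, 7, 11, 13, 17, 19, 23)
--
-- def gen_tup(s, n):
--     if (s, n) in tup_bank.keys():
--         return tup_bank[(s, n)]
--
--     if s == 0:
--         ret = [(0,) * n]
--         tup_bank[(s, n)] = ret
--         return ret
--
--     elif n == 1:
--         ret = [(s,)]
--         tup_bank[(s, n)] = ret
--         return ret
--
--     out = []
--     for i in range(0, s + 1):
--         prev = gen_tup(s - i, n - 1)
--         out += [(i,) + p for p in prev]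
--     tup_bank[(s, n)] = out
--     return out
--
-- def gen_rows(pows, n):
--     rows = {(1,) * n}
--     for p, pow in zip(primes, pows):
--         ptups = gen_tup(pow, n)
--         new_rows = set()
--         for row in rows:
--             for tup in ptups:
--                 new_rows.add(
--                     tuple(
--                         sorted(
--                             [elt * (p**r) for elt, r in zip(row, tup)], reverse=True
--                         )
--                     )
--                 )
--         rows = new_rows
--     return rows
-- ===== SOURCE B (Python) =====
-- primes = (2, 3, 5, 7, 11, 13, 17, 19, 23)
--
--
-- def _comps(s, n):
--     # all length-n tuples of the exponents summing to s, in lexicographic order,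
--     # built bottom-up by number of parts (no recursion)
--     if s == 0:
--         return [(0,) * n]
--     if n == 1:
--         return [(s,)]
--     if s < 0 or n <= 0:
--         return []
--     table = [[(j,)] for j in range(s + 1)]  # table[j]: compositions of j into 1 part
--     for _ in range(n - 2):
--         table = [
--             [(i,) + rest for i in range(j + 1) for rest in table[j - i]]
--             for j in range(s + 1)
--         ]
--     # final level: only the row for total s is needed
--     return [(i,) + rest for i in range(s + 1) for rest in table[s - i]]
--
--
-- def gen_rows(pows, n):
--     # Recursively expand the candidate-row sets over the prime/power pairs,
--     # folding each previous row's scaled-and-sorted batch in with one update.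
--     def expand(pairs):
--         if not pairs:
--             return {(1,) * n}
--         p, s = pairs[-1]
--         comps = _comps(s, n)
--         out = set()
--         for row in expand(pairs[:-1]):
--             out.update(
--                 tuple(sorted((e * p ** r for e, r in zip(row, t)), reverse=True))
--                 for t in comps
--             )
--         return out
--
--     return expand(list(zip(primes, pows)))
-- ===== Notes on version B (the rewrite author's own statement) =====
-- stated objective: alternative
-- what changed: A loops over the primes rebuilding the set with two nested loops of single adds and generates exponent compositions with a memoized recursive helper; B recurses over the prime/power pairs, builds each level with one set-update of a mapped batch per previous row, and generates each prime's compositions with an iterative bottom-up table that materialises only the needed final row.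
import Mathlib
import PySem

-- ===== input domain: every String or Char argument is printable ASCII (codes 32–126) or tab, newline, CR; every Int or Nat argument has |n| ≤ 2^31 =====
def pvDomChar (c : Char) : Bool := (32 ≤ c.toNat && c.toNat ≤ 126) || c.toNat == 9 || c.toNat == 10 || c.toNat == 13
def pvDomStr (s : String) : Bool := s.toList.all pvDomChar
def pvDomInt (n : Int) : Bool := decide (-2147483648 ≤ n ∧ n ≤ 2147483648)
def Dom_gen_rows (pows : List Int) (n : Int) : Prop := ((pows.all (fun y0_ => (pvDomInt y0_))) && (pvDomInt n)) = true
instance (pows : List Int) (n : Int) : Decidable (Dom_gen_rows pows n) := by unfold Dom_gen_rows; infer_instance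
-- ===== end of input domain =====

-- B replaces A's per-prime loop with nested add calls and memoized recursive composition
-- generator by a recursion over the prime/power pairs whose levels are built with one
-- set-update per row, and generates each prime's exponent compositions with an iterative
-- bottom-up table (only the needed final row) instead of recursion (objective: alternative
-- decomposition, not claimed faster).

-- ===== PORT A =====
def pvPrimes : List Int := [2, 3, 5, 7, 11, 13, 17, 19, 23]

-- Python's tup_bank is a pure memo cache: it never changes any returned value, so the
-- port computes the same results without it.
-- '(0,) * n' is empty for n ≤ 0, which 'List.replicate n.toNat 0' reproduces.
-- Totality guard 'n ≤ 0 → []': there Python returns [] when s < 0 (its loop range is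
-- empty) and diverges when 0 < s (RecursionError); gen_rows reaches the diverging case
-- only outside Pre_gen_rows.
def gen_tup (s n : Int) : List (List Int) :=
  if _h1 : s = 0 then [List.replicate n.toNat 0]
  else if _h2 : n = 1 then [[s]]
  else if _h3 : n ≤ 0 then []
  else
    (PySem.List.pyRange 0 (s + 1) 1).foldl
      (fun out i => out ++ (gen_tup (s - i) (n - 1)).map (fun p => i :: p)) []
termination_by n.toNat
decreasing_by omega

-- 'p ** r' is ported as 'p ^ r.toNat': inside Pre_gen_rows every exponent r produced by
-- gen_tup is ≥ 0, where this is exact (Python gives a float for r < 0, excluded by Pre_).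
def gen_rows (pows : List Int) (n : Int) : List (List Int) :=
  (pvPrimes.zip pows).foldl
    (fun rows pp =>
      let ptups := gen_tup pp.2 n
      rows.foldl
        (fun new_rows row =>
          ptups.foldl
            (fun new_rows tup =>
              PySem.Set.add new_rows
                (PySem.List.sorted ((row.zip tup).map (fun er => er.1 * pp.1 ^ er.2.toNat))
                  (fun x => x) true))
            new_rows)
        PySem.Set.empty)
    ([List.replicate n.toNat 1] : PySem.Set (List Int))

-- ===== PORT B =====
-- _comps of Source B: bottom-up table by number of parts, then only the final row for total
-- s; table[j - i] and table[s - i] are always in range, ported with pyGetD (default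
-- never used).
def pvCompos (s n : Int) : List (List Int) :=
  if s = 0 then [List.replicate n.toNat 0]
  else if n = 1 then [[s]]
  else if s < 0 ∨ n ≤ 0 then []
  else
    let table :=
      (List.range (n - 2).toNat).foldl
        (fun table _ =>
          (PySem.List.pyRange 0 (s + 1) 1).map
            (fun j =>
              (PySem.List.pyRange 0 (j + 1) 1).flatMap
                (fun i => (PySem.List.pyGetD table (j - i) []).map (fun rest => i :: rest))))
        ((PySem.List.pyRange 0 (s + 1) 1).map (fun j => [[j]]))
    (PySem.List.pyRange 0 (s + 1) 1).flatMap
      (fun i => (PySem.List.pyGetD table (s - i) []).map (fun rest => i :: rest))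

-- expand of Source B: recursion on pairs[:-1]; each level folds one Set.update (the
-- generator of scaled, descending-sorted tuples) per previous row into a fresh set.
def pvExpand (n : Int) (pairs : List (Int × Int)) : PySem.Set (List Int) :=
  if h : pairs = [] then [List.replicate n.toNat 1]
  else
    let ps := pairs.getLast h
    let comps := pvCompos ps.2 n
    (pvExpand n pairs.dropLast).foldl
      (fun out row =>
        PySem.Set.update out
          (comps.map
            (fun t =>
              PySem.List.sorted ((row.zip t).map (fun er => er.1 * ps.1 ^ er.2.toNat))
                (fun x => x) true)))
      PySem.Set.empty
termination_by pairs.length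
decreasing_by
  have := List.length_pos_of_ne_nil h
  simp [List.length_dropLast]
  omega

def gen_rows_alt (pows : List Int) (n : Int) : List (List Int) :=
  pvExpand n (pvPrimes.zip pows)

-- ===== PRECONDITION & SPEC =====
-- Pre_ excludes exactly the inputs on which Python A does not return a set of int
-- tuples: with n = 1 a negative power among the first nine makes 'p**r' a float, so
-- A's value leaves the declared type; with n ≤ 0 a positive power among the first
-- nine makes gen_tup recurse forever (RecursionError).
def Pre_gen_rows (pows : List Int) (n : Int) : Prop :=
  (n = 1 → ∀ x ∈ pows.take 9, 0 ≤ x) ∧ (n ≤ 0 → ∀ x ∈ pows.take 9, x ≤ 0)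
instance (pows : List Int) (n : Int) : Decidable (Pre_gen_rows pows n) := by
  unfold Pre_gen_rows; infer_instance

def pvWitness_gen_rows : List Int × Int := ([1, 1], 2)

def Spec_gen_rows (pows : List Int) (n : Int) (out : List (List Int)) : Prop := out = gen_rows_alt pows n
instance (pows : List Int) (n : Int) (out : List (List Int)) : Decidable (Spec_gen_rows pows n out) := by unfold Spec_gen_rows; infer_instance

-- ===== CLAIM (what is proved, stated in full; the proofs are below) =====
def Claim_equal_gen_rows : Prop := ∀ (pows : List Int) (n : Int), Dom_gen_rows pows n → Pre_gen_rows pows n → Spec_gen_rows pows n (gen_rows pows n)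

-- ===== LEMMAS AND PROOFS =====

-- the shared per-prime step: multiply a row slotwise by p to each exponent tuple, sort descending
def pvH (p s n : Int) (row : List Int) : List (List Int) :=
  (pvCompos s n).map
    (fun t =>
      PySem.List.sorted ((row.zip t).map (fun er => er.1 * p ^ er.2.toNat)) (fun x => x) true)

-- B's bottom-up table: after m rounds, entry j holds A's gen_tup j (m+1)
theorem compsTable_invariant (s : Int) (m : Nat) :
    (List.range m).foldl
        (fun table _ =>
          (PySem.List.pyRange 0 (s + 1) 1).map
            (fun j =>
              (PySem.List.pyRange 0 (j + 1) 1).flatMap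
                (fun i => (PySem.List.pyGetD table (j - i) []).map (fun rest => i :: rest))))
        ((PySem.List.pyRange 0 (s + 1) 1).map (fun j => [[j]]))
      = (PySem.List.pyRange 0 (s + 1) 1).map (fun j => gen_tup j ((m : Int) + 1)) := by
  induction m with
  | zero =>
    rw [List.range_zero, List.foldl_nil]
    apply List.map_congr_left
    intro j hj
    have hj0 : 0 ≤ j := (PySem.List.mem_pyRange_one.mp hj).1
    simp only [Nat.cast_zero, zero_add]
    by_cases h0 : j = 0
    · subst h0
      rw [gen_tup, dif_pos rfl]
      simp
    · rw [gen_tup, dif_neg h0, dif_pos rfl]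
  | succ m ih =>
    rw [List.range_succ, List.foldl_append, ih, List.foldl_cons, List.foldl_nil]
    apply List.map_congr_left
    intro j hj
    obtain ⟨hj0, hjs⟩ := PySem.List.mem_pyRange_one.mp hj
    push_cast
    have hget : ∀ i ∈ PySem.List.pyRange 0 (j + 1) 1,
        (PySem.List.pyGetD
            ((PySem.List.pyRange 0 (s + 1) 1).map (fun j' => gen_tup j' ((m : Int) + 1)))
            (j - i) []).map (fun rest => i :: rest)
          = (gen_tup (j - i) ((m : Int) + 1)).map (fun rest => i :: rest) := by
      intro i hi
      obtain ⟨hi0, hij⟩ := PySem.List.mem_pyRange_one.mp hi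
      rw [PySem.List.pyGetD_map_pyRange_of_nonneg _ _ _ _ (by omega) (by omega)]
    rw [List.flatMap_congr hget]
    by_cases h0 : j = 0
    · subst h0
      rw [PySem.List.pyRange_one_singleton, List.flatMap_cons, List.flatMap_nil,
        List.append_nil]
      simp only [sub_zero]
      rw [gen_tup, dif_pos rfl, gen_tup, dif_pos rfl]
      have h1 : ((m : Int) + 1).toNat = m + 1 := by omega
      have h2 : ((m : Int) + 1 + 1).toNat = m + 2 := by omega
      simp [h1, h2, List.replicate_succ]
    · have hms : (m : Int) + 1 + 1 - 1 = (m : Int) + 1 := by ring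
      rw [gen_tup, dif_neg h0, dif_neg (by omega : ¬ (m : Int) + 1 + 1 = 1),
        dif_neg (by omega : ¬ (m : Int) + 1 + 1 ≤ 0),
        PySem.List.foldl_append_eq_flatMap, List.nil_append, hms]

-- A's gen_tup computes B's pvCompos (recursive descent vs bottom-up table + final row)
theorem gen_tup_eq_pvCompos (s n : Int) : gen_tup s n = pvCompos s n := by
  rw [pvCompos]
  split
  · rw [gen_tup]
    next h => rw [dif_pos h]
  · split
    · next h1 h2 => rw [gen_tup, dif_neg h1, dif_pos h2]
    · split
      · next h1 h2 h3 =>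
        rw [gen_tup, dif_neg h1, dif_neg h2]
        by_cases hn : n ≤ 0
        · rw [dif_pos hn]
        · rw [dif_neg hn]
          have hs : s < 0 := by
            rcases h3 with h | h
            · exact h
            · exact absurd h hn
          rw [PySem.List.pyRange_one_eq_nil (by omega), List.foldl_nil]
      · next h1 h2 h3 =>
        obtain ⟨hs', hn'⟩ := not_or.mp h3
        -- the table after n-2 rounds holds gen_tup · (n-1) at every index; the final
        -- row assembles gen_tup s n exactly as A's loop does
        rw [gen_tup, dif_neg h1, dif_neg h2, dif_neg hn',
          PySem.List.foldl_append_eq_flatMap, List.nil_append,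
          compsTable_invariant s (n - 2).toNat]
        have hcast : (((n - 2).toNat : Int)) + 1 = n - 1 := by omega
        rw [hcast]
        apply List.flatMap_congr
        intro i hi
        obtain ⟨hi0, his⟩ := PySem.List.mem_pyRange_one.mp hi
        rw [PySem.List.pyGetD_map_pyRange_of_nonneg _ _ _ _ (by omega) (by omega)]

-- A's inner 'for tup in ptups: new_rows.add …' is B's one Set.update of the mapped batch
theorem inner_fold_eq_update (ptups : List (List Int)) (f : List Int → List Int)
    (s0 : PySem.Set (List Int)) :
    ptups.foldl (fun nr tup => PySem.Set.add nr (f tup)) s0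
      = PySem.Set.update s0 (ptups.map f) := by
  rw [PySem.Set.update, List.foldl_map]

-- B's expansion step, read off the last pair
theorem pvExpand_concat (n : Int) (ps : List (Int × Int)) (q : Int × Int) :
    pvExpand n (ps ++ [q])
      = (pvExpand n ps).foldl
          (fun out row => PySem.Set.update out (pvH q.1 q.2 n row)) PySem.Set.empty := by
  rw [pvExpand]
  have hne : ps ++ [q] ≠ [] := by simp
  rw [dif_neg hne]
  simp only [List.getLast_append, List.dropLast_concat]
  rfl

-- main induction: A's left fold over the pairs computes B's expansion level by level
theorem fold_eq_expand (n : Int) (pairs : List (Int × Int)) :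
    pairs.foldl
        (fun rows pp =>
          rows.foldl (fun out row => PySem.Set.update out (pvH pp.1 pp.2 n row))
            PySem.Set.empty)
        ([List.replicate n.toNat 1] : PySem.Set (List Int))
      = pvExpand n pairs := by
  induction pairs using List.reverseRecOn with
  | nil => rw [pvExpand, dif_pos rfl, List.foldl_nil]
  | append_singleton ps q ih =>
    rw [List.foldl_append, List.foldl_cons, List.foldl_nil, ih, pvExpand_concat]

-- ===== VERDICT (by name: the statement is the Claim_ definition above) =====
theorem gen_rows_spec : Claim_equal_gen_rows := by
  intro pows n _hdom _hpre
  unfold Spec_gen_rows gen_rows gen_rows_alt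
  have hstep :
      (fun (rows : PySem.Set (List Int)) (pp : Int × Int) =>
        let ptups := gen_tup pp.2 n
        rows.foldl
          (fun new_rows row =>
            ptups.foldl
              (fun new_rows tup =>
                PySem.Set.add new_rows
                  (PySem.List.sorted ((row.zip tup).map (fun er => er.1 * pp.1 ^ er.2.toNat))
                    (fun x => x) true))
              new_rows)
          PySem.Set.empty)
      = (fun (rows : PySem.Set (List Int)) (pp : Int × Int) =>
          rows.foldl (fun out row => PySem.Set.update out (pvH pp.1 pp.2 n row))
            PySem.Set.empty) := by
    funext rows pp
    show rows.foldl _ _ = _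
    apply PySem.List.foldl_congr_mem
    intro out row _
    rw [inner_fold_eq_update (gen_tup pp.2 n)
      (fun tup =>
        PySem.List.sorted ((row.zip tup).map (fun er => er.1 * pp.1 ^ er.2.toNat))
          (fun x => x) true) out]
    rw [gen_tup_eq_pvCompos]
    rfl
  rw [hstep, fold_eq_expand]
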